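-- pv_equiv track=rewrite | github.com/sudhakar-bellamkonda/VibeCoding | src/performance/tracker.py | old_user_performance
-- ===== SOURCE A (Python) =====
-- from typing import Dict, Set, List
--
-- def old_user_performance(data: List[Dict[str, str]]) -> Dict[str, int]:
--     performance = {}
--     for entry in data:
--         user = entry["user"]
--         account = entry["account"]
--         if user not in performance:
--             performance[user] = set()
--         performance[user].add(account)
--     return {user: len(accounts) for user, accounts in performance.items()}
-- ===== SOURCE B (Python) =====
-- def old_user_performance(data):
--     pairs = set()
--     for entry in data:
--         user = entry["user"]
--         account = entry["account"]
--         pairs.add((user, account))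
--     counts = {}
--     for user, _ in pairs:
--         counts[user] = counts.get(user, 0) + 1
--     return counts
-- ===== Notes on version B (the rewrite author's own statement) =====
-- stated objective: alternative
-- what changed: Replaces the dict-of-per-user-sets with a single flat set of (user, account) pairs built in one pass, then a separate tally pass that counts pairs per user with counts.get(user, 0) + 1.
import Mathlib
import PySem

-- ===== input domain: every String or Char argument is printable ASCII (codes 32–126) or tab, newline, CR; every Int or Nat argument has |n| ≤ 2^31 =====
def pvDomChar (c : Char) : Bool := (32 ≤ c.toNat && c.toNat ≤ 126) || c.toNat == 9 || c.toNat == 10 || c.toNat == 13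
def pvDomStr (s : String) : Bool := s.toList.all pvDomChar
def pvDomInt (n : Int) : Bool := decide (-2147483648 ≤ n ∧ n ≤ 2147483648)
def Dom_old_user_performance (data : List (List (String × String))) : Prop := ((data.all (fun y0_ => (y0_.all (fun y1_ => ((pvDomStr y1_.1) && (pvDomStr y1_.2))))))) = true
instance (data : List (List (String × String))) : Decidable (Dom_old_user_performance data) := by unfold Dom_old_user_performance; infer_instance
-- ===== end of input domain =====

-- B replaces A's dict of per-user account sets by one flat set of (user, account)
-- pairs plus a separate per-user tally pass: a different decomposition, same cost.

-- shared helper: entry["key"] (first-match association-list lookup); total form with a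
-- default, used ONLY under Pre_old_user_performance, which guarantees the key is present
-- (Python raises KeyError where the key is missing).
def pvEntryGetD (e : List (String × String)) (k dflt : String) : String :=
  match e.find? (fun p => p.1 == k) with
  | some p => p.2
  | none => dflt

-- ===== PORT A =====
def pvStepA (perf : PySem.Dict String (PySem.Set String)) (entry : List (String × String)) :
    PySem.Dict String (PySem.Set String) :=
  let user := pvEntryGetD entry "user" ""
  let account := pvEntryGetD entry "account" ""
  let perf1 := if perf.contains user then perf else perf.insert user PySem.Set.empty
  perf1.modify user PySem.Set.empty (fun s => PySem.Set.add s account)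

def old_user_performance (data : List (List (String × String))) : List (String × Int) :=
  let performance := data.foldl pvStepA PySem.Dict.empty
  performance.items.map (fun p => (p.1, PySem.Set.len p.2))

-- ===== PORT B =====
def pvStepB (pairs : PySem.Set (String × String)) (entry : List (String × String)) :
    PySem.Set (String × String) :=
  PySem.Set.add pairs (pvEntryGetD entry "user" "", pvEntryGetD entry "account" "")

def old_user_performance_alt (data : List (List (String × String))) : List (String × Int) :=
  let pairs := data.foldl pvStepB PySem.Set.empty
  let counts : PySem.Dict String Int :=
    pairs.foldl (fun (d : PySem.Dict String Int) p => d.insert p.1 (d.getD p.1 0 + 1)) PySem.Dict.empty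
  counts.items

-- ===== PRECONDITION & SPEC =====
-- Pre_: every entry carries the keys "user" and "account"; on any other input Python A
-- raises KeyError (it returns on every input Pre_ admits).
def Pre_old_user_performance (data : List (List (String × String))) : Prop :=
  ∀ e ∈ data, "user" ∈ e.map Prod.fst ∧ "account" ∈ e.map Prod.fst
instance (data : List (List (String × String))) : Decidable (Pre_old_user_performance data) := by
  unfold Pre_old_user_performance; infer_instance
def pvWitness_old_user_performance : (List (List (String × String))) :=
  [[("user", "u1"), ("account", "a1")], [("user", "u2"), ("account", "a1")]]
def Spec_old_user_performance (data : List (List (String × String))) (out : List (String × Int)) : Prop := out = old_user_performance_alt data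
instance (data : List (List (String × String))) (out : List (String × Int)) : Decidable (Spec_old_user_performance data out) := by unfold Spec_old_user_performance; infer_instance

-- ===== CLAIM (what is proved, stated in full; the proofs are below) =====
def Claim_equal_old_user_performance : Prop := ∀ (data : List (List (String × String))), Dom_old_user_performance data → Pre_old_user_performance data → Spec_old_user_performance data (old_user_performance data)

-- ===== LEMMAS AND PROOFS =====

-- loop invariant tying A's dict of per-user sets to B's flat set of pairs:
-- the dict's keys are the users in first-appearance order, and each user's set is
-- the (deduplicated, ordered) list of that user's accounts among the pairs.
def pvInv (perf : PySem.Dict String (PySem.Set String)) (P : PySem.Set (String × String)) : Prop :=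
  perf.keys = PySem.Set.ofList (P.map Prod.fst) ∧
  ∀ u, perf.getD u PySem.Set.empty = (P.filter (fun p => p.1 == u)).map Prod.snd

lemma pvOfList_append_singleton {α : Type} [BEq α] (xs : List α) (x : α) :
    PySem.Set.ofList (xs ++ [x]) = PySem.Set.add (PySem.Set.ofList xs) x := by
  rw [PySem.Set.ofList_eq_foldl, PySem.Set.ofList_eq_foldl, List.foldl_append]; rfl

lemma pvInv_step (perf : PySem.Dict String (PySem.Set String)) (P : PySem.Set (String × String))
    (u a : String) (h : pvInv perf P) :
    pvInv ((if perf.contains u then perf else perf.insert u PySem.Set.empty).modify u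
             PySem.Set.empty (fun s => PySem.Set.add s a))
          (PySem.Set.add P (u, a)) := by
  obtain ⟨hk, hg⟩ := h
  by_cases hmem : (u, a) ∈ P
  · -- pair already seen: both states are unchanged
    rw [PySem.Set.add_of_mem hmem]
    have hc : perf.contains u = true := by
      rw [PySem.Dict.contains_iff_mem_keys, hk, PySem.Set.mem_ofList]
      exact List.mem_map_of_mem hmem
    have hain : a ∈ perf.getD u PySem.Set.empty := by
      rw [hg u]
      exact List.mem_map_of_mem (List.mem_filter.mpr ⟨hmem, by simp⟩)
    rw [if_pos hc]
    have hm : perf.modify u PySem.Set.empty (fun s => PySem.Set.add s a)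
        = perf.insert u (PySem.Set.add (perf.getD u PySem.Set.empty) a) := rfl
    rw [hm, PySem.Set.add_of_mem hain]
    refine ⟨by rw [PySem.Dict.keys_insert_of_contains (h := hc), hk], fun v => ?_⟩
    rw [PySem.Dict.getD_insert]
    by_cases hv : v = u
    · subst hv; rw [if_pos rfl]; exact hg v
    · rw [if_neg hv]; exact hg v
  · -- new pair, appended to P
    rw [PySem.Set.add_of_not_mem hmem]
    have hmapf : (P ++ [(u, a)]).map Prod.fst = P.map Prod.fst ++ [u] := by simp
    by_cases hc : perf.contains u = true
    · have huk : u ∈ PySem.Set.ofList (P.map Prod.fst) := by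
        rw [← hk, ← PySem.Dict.contains_iff_mem_keys]; exact hc
      have hanot : a ∉ perf.getD u PySem.Set.empty := by
        rw [hg u]
        intro hcontra
        obtain ⟨p, hpf, hps⟩ := List.mem_map.mp hcontra
        obtain ⟨hpP, hp1⟩ := List.mem_filter.mp hpf
        have hp1' : p.1 = u := by simpa using hp1
        have : p = (u, a) := by cases p; simp_all
        exact hmem (this ▸ hpP)
      rw [if_pos hc]
      have hm : perf.modify u PySem.Set.empty (fun s => PySem.Set.add s a)
          = perf.insert u (PySem.Set.add (perf.getD u PySem.Set.empty) a) := rfl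
      rw [hm, PySem.Set.add_of_not_mem hanot]
      constructor
      · rw [PySem.Dict.keys_insert_of_contains (h := hc), hk, hmapf,
          pvOfList_append_singleton, PySem.Set.add_of_mem huk]
      · intro v
        rw [PySem.Dict.getD_insert]
        by_cases hv : v = u
        · subst hv
          rw [if_pos rfl, hg v, List.filter_append, List.map_append]
          simp
        · rw [if_neg hv, hg v, List.filter_append]
          have hbeq : (u == v) = false := by
            simp only [beq_eq_false_iff_ne, ne_eq]
            exact Ne.symm hv
          have : List.filter (fun p => p.1 == v) [(u, a)] = [] := by
            simp [List.filter, hbeq]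
          rw [this, List.append_nil]
    · have hnotP : u ∉ P.map Prod.fst := by
        intro hin
        exact hc ((PySem.Dict.contains_iff_mem_keys perf u).mpr
          (by rw [hk, PySem.Set.mem_ofList]; exact hin))
      have hnotS : u ∉ PySem.Set.ofList (P.map Prod.fst) := by
        rw [PySem.Set.mem_ofList]; exact hnotP
      rw [if_neg hc]
      have hm : (perf.insert u PySem.Set.empty).modify u PySem.Set.empty
            (fun s => PySem.Set.add s a)
          = (perf.insert u PySem.Set.empty).insert u
              (PySem.Set.add ((perf.insert u PySem.Set.empty).getD u PySem.Set.empty) a) := rfl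
      rw [hm, PySem.Dict.getD_insert_self]
      have hcontains1 : (perf.insert u PySem.Set.empty).contains u = true :=
        PySem.Dict.contains_insert_self _ _ _
      have hcempty : perf.contains u = false := by
        rw [← Bool.not_eq_true]; exact hc
      constructor
      · rw [PySem.Dict.keys_insert_of_contains (h := hcontains1),
          PySem.Dict.keys_insert_of_not_contains (h := hcempty), hk, hmapf,
          pvOfList_append_singleton, PySem.Set.add_of_not_mem hnotS]
      · intro v
        rw [PySem.Dict.getD_insert]
        by_cases hv : v = u
        · subst hv
          have hfilterP : P.filter (fun p => p.1 == v) = [] := by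
            rw [List.filter_eq_nil_iff]
            intro p hp hbeq
            exact hnotP (by
              have : p.1 = v := by simpa using hbeq
              exact this ▸ List.mem_map_of_mem hp)
          rw [if_pos rfl, List.filter_append, hfilterP]
          simp [PySem.Set.add, PySem.Set.empty]
        · rw [if_neg hv, PySem.Dict.getD_insert_of_ne (hne := hv), hg v, List.filter_append]
          have hbeq : (u == v) = false := by
            simp only [beq_eq_false_iff_ne, ne_eq]
            exact Ne.symm hv
          have : List.filter (fun p => p.1 == v) [(u, a)] = [] := by
            simp [List.filter, hbeq]
          rw [this, List.append_nil]

lemma pvInv_foldl (data : List (List (String × String)))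
    (perf : PySem.Dict String (PySem.Set String)) (P : PySem.Set (String × String))
    (h : pvInv perf P) : pvInv (data.foldl pvStepA perf) (data.foldl pvStepB P) := by
  induction data generalizing perf P with
  | nil => exact h
  | cons e t ih =>
    exact ih _ _ (pvInv_step perf P (pvEntryGetD e "user" "") (pvEntryGetD e "account" "") h)

-- ===== VERDICT (by name: the statement is the Claim_ definition above) =====
theorem old_user_performance_spec : Claim_equal_old_user_performance := by
  intro data _ _
  unfold Spec_old_user_performance
  show (data.foldl pvStepA PySem.Dict.empty).items.map (fun p => (p.1, PySem.Set.len p.2))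
      = ((data.foldl pvStepB PySem.Set.empty).foldl
          (fun (d : PySem.Dict String Int) p => d.insert p.1 (d.getD p.1 0 + 1))
          PySem.Dict.empty).items
  obtain ⟨hk, hg⟩ := pvInv_foldl data PySem.Dict.empty PySem.Set.empty
    ⟨by simp [PySem.Dict.keys_empty, PySem.Set.ofList, PySem.Set.empty], by
      intro u; simp [PySem.Dict.getD_empty, PySem.Set.empty]⟩
  set perf := data.foldl pvStepA PySem.Dict.empty with hperf
  set P := data.foldl pvStepB PySem.Set.empty with hP
  have hnd : perf.keys.Nodup := by rw [hk]; exact PySem.Set.nodup_ofList _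
  -- A's side: items through keys
  rw [PySem.Dict.items_eq_map_keys perf hnd PySem.Set.empty, List.map_map, hk]
  -- B's side: the tally loop is Counter(P.map fst)
  have hcounter : P.foldl (fun (d : PySem.Dict String Int) p => d.insert p.1 (d.getD p.1 0 + 1))
      PySem.Dict.empty = PySem.Dict.counter (P.map Prod.fst) := by
    rw [← PySem.Dict.foldl_insert_getD_add_one_eq_counter, List.foldl_map]
  rw [hcounter, PySem.Dict.items_counter]
  refine List.map_congr_left (fun u _ => ?_)
  simp only [Function.comp]
  rw [hg u]
  congr 1
  simp only [PySem.Set.len, List.length_map, List.count_eq_countP, List.countP_map]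
  norm_cast
  show (List.filter (fun p => p.1 == u) P).length = List.countP (fun p => p.1 == u) P
  exact Eq.symm List.countP_eq_length_filter
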